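-- pv_equiv track=rewrite | github.com/rong-hash/VeriMine | verilog_mining/verilog_test_runner.py | detect_simulator_from_files
-- ===== SOURCE A (Python) =====
-- from typing import Dict, List, Optional, Tuple
--
-- def detect_simulator_from_files(files: List[str]) -> str:
--     """
--     Detect simulator from a list of file paths (without reading contents).
--     """
--     for f in files:
--         fl = f.lower()
--         if "cocotb" in fl:
--             return "cocotb"
--         if fl.endswith(".py") and ("test_" in fl or "_test.py" in fl):
--             return "cocotb"  # Likely cocotb
--
--     for f in files:
--         if "verilator" in f.lower():
--             return "verilator"
--
--     return "iverilog"
-- ===== SOURCE B (Python) =====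
-- def detect_simulator_from_files(files):
--     """
--     Detect simulator from a list of file paths (without reading contents).
--     Single pass: return 'cocotb' immediately on a match, remember verilator hits.
--     """
--     seen_verilator = False
--     for f in files:
--         fl = f.lower()
--         if "cocotb" in fl or (fl.endswith(".py") and ("test_" in fl or "_test.py" in fl)):
--             return "cocotb"
--         seen_verilator = seen_verilator or ("verilator" in fl)
--     return "verilator" if seen_verilator else "iverilog"
-- ===== Notes on version B (the rewrite author's own statement) =====
-- stated objective: simpler
-- what changed: Replaces A's two sequential scans over the file list with a single pass that returns 'cocotb' immediately and carries a seen_verilator flag to decide between 'verilator' and 'iverilog' at the end.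
import Mathlib
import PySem

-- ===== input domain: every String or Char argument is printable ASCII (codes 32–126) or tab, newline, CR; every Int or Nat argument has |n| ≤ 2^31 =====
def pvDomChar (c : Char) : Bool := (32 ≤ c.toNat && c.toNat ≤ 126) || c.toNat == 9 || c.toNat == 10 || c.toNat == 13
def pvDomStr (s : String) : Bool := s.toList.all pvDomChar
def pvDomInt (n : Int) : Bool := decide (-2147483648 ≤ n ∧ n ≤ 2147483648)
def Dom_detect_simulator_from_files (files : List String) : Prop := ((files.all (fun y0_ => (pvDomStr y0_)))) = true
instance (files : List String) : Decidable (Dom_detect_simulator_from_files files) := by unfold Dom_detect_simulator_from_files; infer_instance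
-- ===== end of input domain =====

-- B replaces A's two sequential scans by one pass with a seen_verilator flag (objective: simpler).

-- ===== PORT A =====
-- first Python loop: returns some "cocotb" on a match, none otherwise
def detA_loop1 : List String → Option String
  | [] => none
  | f :: rest =>
    let fl := PySem.Str.lower f
    if PySem.Str.isIn "cocotb" fl then some "cocotb"
    else if PySem.Str.endswith fl ".py" &&
            (PySem.Str.isIn "test_" fl || PySem.Str.isIn "_test.py" fl) then some "cocotb"
    else detA_loop1 rest

-- second Python loop and the final return
def detA_loop2 : List String → String
  | [] => "iverilog"
  | f :: rest =>
    if PySem.Str.isIn "verilator" (PySem.Str.lower f) then "verilator"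
    else detA_loop2 rest

def detect_simulator_from_files (files : List String) : String :=
  match detA_loop1 files with
  | some s => s
  | none => detA_loop2 files

-- ===== PORT B =====
-- single pass with the seen_verilator flag
def detB_loop : List String → Bool → String
  | [], seen => if seen then "verilator" else "iverilog"
  | f :: rest, seen =>
    let fl := PySem.Str.lower f
    if PySem.Str.isIn "cocotb" fl ||
       (PySem.Str.endswith fl ".py" &&
        (PySem.Str.isIn "test_" fl || PySem.Str.isIn "_test.py" fl)) then "cocotb"
    else detB_loop rest (seen || PySem.Str.isIn "verilator" fl)

def detect_simulator_from_files_alt (files : List String) : String :=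
  detB_loop files false

-- ===== PRECONDITION & SPEC =====
def Spec_detect_simulator_from_files (files : List String) (out : String) : Prop := out = detect_simulator_from_files_alt files
instance (files : List String) (out : String) : Decidable (Spec_detect_simulator_from_files files out) := by unfold Spec_detect_simulator_from_files; infer_instance

-- ===== CLAIM (what is proved, stated in full; the proofs are below) =====
def Claim_equal_detect_simulator_from_files : Prop := ∀ (files : List String), Dom_detect_simulator_from_files files → Spec_detect_simulator_from_files files (detect_simulator_from_files files)

-- ===== LEMMAS AND PROOFS =====
theorem detB_loop_eq (files : List String) : ∀ (seen : Bool),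
    detB_loop files seen =
      match detA_loop1 files with
      | some s => s
      | none => if seen then "verilator" else detA_loop2 files := by
  induction files with
  | nil => intro seen; rfl
  | cons f rest ih =>
    intro seen
    simp only [detB_loop, detA_loop1, detA_loop2]
    by_cases h1 : PySem.Str.isIn "cocotb" (PySem.Str.lower f) = true
    · rw [if_pos (show (_ || _) = true by rw [Bool.or_eq_true]; exact Or.inl h1), if_pos h1]
    · by_cases h2 : (PySem.Str.endswith (PySem.Str.lower f) ".py" &&
          (PySem.Str.isIn "test_" (PySem.Str.lower f) ||
           PySem.Str.isIn "_test.py" (PySem.Str.lower f))) = true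
      · rw [if_pos (show (_ || _) = true by rw [Bool.or_eq_true]; exact Or.inr h2),
            if_neg h1, if_pos h2]
      · rw [if_neg (show ¬ (_ || _) = true by
              rw [Bool.or_eq_true]; rintro (h | h); exact h1 h; exact h2 h),
            if_neg h1, if_neg h2, ih]
        cases hA : detA_loop1 rest with
        | some s => rfl
        | none =>
          cases seen
          · cases PySem.Str.isIn "verilator" (PySem.Str.lower f) <;> rfl
          · rfl

-- ===== VERDICT (by name: the statement is the Claim_ definition above) =====
theorem detect_simulator_from_files_spec : Claim_equal_detect_simulator_from_files := by
  intro files _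
  unfold Spec_detect_simulator_from_files detect_simulator_from_files detect_simulator_from_files_alt
  rw [detB_loop_eq]
  cases detA_loop1 files <;> simp
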